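-- pv_equiv track=rewrite | github.com/23wh1a12c1/CodeChef-Problems | 1000 to 1400 difficulty problems/Positive Products.py | count_positive_products
-- ===== SOURCE A (Python) =====
-- def count_positive_products(test_cases):
--     results = []
--     for A in test_cases:
--         pos = sum(1 for x in A if x > 0)
--         neg = sum(1 for x in A if x < 0)
--         # Pairs of positive numbers + pairs of negative numbers
--         count = (pos * (pos - 1)) // 2 + (neg * (neg - 1)) // 2
--         results.append(count)
--     return results
-- ===== SOURCE B (Python) =====
-- def count_positive_products(test_cases):
--     def pair_count(A):
--         if not A:
--             return 0
--         x, rest = A[0], A[1:]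
--         return sum(1 for y in rest if x * y > 0) + pair_count(rest)
--     return [pair_count(A) for A in test_cases]
-- ===== Notes on version B (the rewrite author's own statement) =====
-- stated objective: alternative
-- what changed: Replaces the count-signs-plus-closed-formula (C(pos,2)+C(neg,2)) by a direct recursive enumeration of unordered pairs with positive product.
import Mathlib
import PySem

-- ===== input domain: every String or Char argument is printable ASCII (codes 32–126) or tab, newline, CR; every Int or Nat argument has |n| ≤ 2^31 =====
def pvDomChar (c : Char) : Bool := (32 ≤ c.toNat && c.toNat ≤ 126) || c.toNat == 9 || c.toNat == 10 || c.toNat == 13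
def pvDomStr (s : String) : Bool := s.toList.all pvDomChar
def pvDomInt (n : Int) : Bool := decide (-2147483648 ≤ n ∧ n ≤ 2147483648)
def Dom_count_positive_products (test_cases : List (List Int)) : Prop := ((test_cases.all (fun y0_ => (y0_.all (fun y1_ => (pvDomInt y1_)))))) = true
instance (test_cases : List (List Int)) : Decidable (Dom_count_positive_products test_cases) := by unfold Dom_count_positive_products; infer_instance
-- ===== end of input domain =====

-- B replaces A's sign-count closed formula by a direct recursive enumeration of
-- unordered pairs with positive product (alternative decomposition, not faster).

-- ===== PORT A =====
def count_positive_products (test_cases : List (List Int)) : List Int :=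
  test_cases.foldl (fun results A =>
    let pos : Int := A.foldl (fun s x => if x > 0 then s + 1 else s) 0
    let neg : Int := A.foldl (fun s x => if x < 0 then s + 1 else s) 0
    let count := PySem.Int.floordiv (pos * (pos - 1)) 2 + PySem.Int.floordiv (neg * (neg - 1)) 2
    results ++ [count]) []

-- ===== PORT B =====
-- pair_count: first element against the rest, then recurse on the rest
def pvPairCount : List Int → Int
  | [] => 0
  | x :: rest => rest.foldl (fun s y => if x * y > 0 then s + 1 else s) 0 + pvPairCount rest

def count_positive_products_alt (test_cases : List (List Int)) : List Int :=
  test_cases.map pvPairCount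

-- ===== PRECONDITION & SPEC =====
def Spec_count_positive_products (test_cases : List (List Int)) (out : List Int) : Prop := out = count_positive_products_alt test_cases
instance (test_cases : List (List Int)) (out : List Int) : Decidable (Spec_count_positive_products test_cases out) := by unfold Spec_count_positive_products; infer_instance

-- ===== CLAIM (what is proved, stated in full; the proofs are below) =====
def Claim_equal_count_positive_products : Prop := ∀ (test_cases : List (List Int)), Dom_count_positive_products test_cases → Spec_count_positive_products test_cases (count_positive_products test_cases)

-- ===== LEMMAS AND PROOFS =====

-- the conditional counting fold, with arbitrary accumulator, is countP
theorem pv_fold_count (p : Int → Prop) [DecidablePred p] (A : List Int) (s : Int) :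
    A.foldl (fun s x => if p x then s + 1 else s) s = s + (A.countP (fun x => decide (p x)) : Int) := by
  induction A generalizing s with
  | nil => simp
  | cons x xs ih =>
    simp only [List.foldl_cons, List.countP_cons, ih]
    by_cases h : p x
    · simp [h]; ring
    · simp [h]

-- sign split of x * y > 0
theorem pv_inner_count (x : Int) (rest : List Int) :
    rest.countP (fun y => decide (x * y > 0)) =
      if x > 0 then rest.countP (fun y => decide (y > 0))
      else if x < 0 then rest.countP (fun y => decide (y < 0))
      else 0 := by
  rcases lt_trichotomy x 0 with hx | hx | hx
  · simp only [if_neg (by omega : ¬ x > 0), if_pos hx]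
    apply List.countP_congr
    intro y _
    simp only [decide_eq_true_eq]
    constructor
    · intro h; nlinarith
    · intro h; nlinarith
  · subst hx; simp
  · simp only [if_pos hx]
    apply List.countP_congr
    intro y _
    simp only [decide_eq_true_eq]
    constructor
    · intro h; nlinarith
    · intro h; nlinarith

-- the triangular-number step: C(m+1,2) = C(m,2) + m  (Int ediv)
theorem pv_step (m : Int) : (m + 1) * (m + 1 - 1) / 2 = m * (m - 1) / 2 + m := by
  have h : (m + 1) * (m + 1 - 1) = m * (m - 1) + m * 2 := by ring
  rw [h, Int.add_mul_ediv_right _ _ (by omega : (2:Int) ≠ 0)]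

-- key: the pair enumeration equals A's closed formula
theorem pv_pairCount_eq (A : List Int) :
    pvPairCount A =
      PySem.Int.floordiv ((A.countP (fun y => decide (y > 0)) : Int) * ((A.countP (fun y => decide (y > 0)) : Int) - 1)) 2 +
      PySem.Int.floordiv ((A.countP (fun y => decide (y < 0)) : Int) * ((A.countP (fun y => decide (y < 0)) : Int) - 1)) 2 := by
  induction A with
  | nil => simp [pvPairCount, PySem.Int.floordiv]
  | cons x rest ih =>
    have h2 : (0:Int) < 2 := by omega
    rw [PySem.Int.floordiv_eq_ediv_of_pos h2, PySem.Int.floordiv_eq_ediv_of_pos h2]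
    rw [PySem.Int.floordiv_eq_ediv_of_pos h2, PySem.Int.floordiv_eq_ediv_of_pos h2] at ih
    simp only [pvPairCount, pv_fold_count, List.countP_cons, zero_add]
    rw [pv_inner_count, ih]

    rcases lt_trichotomy x 0 with hx | hx | hx
    · simp only [if_neg (by omega : ¬ x > 0), if_pos hx,
        show (decide (x > 0)) = false by simp; omega,
        show (decide (x < 0)) = true by simp [hx]]
      push_cast
      rw [pv_step]
      ring_nf
    · subst hx
      simp
    · simp only [if_pos hx,
        show (decide (x > 0)) = true by simp [hx],
        show (decide (x < 0)) = false by simp; omega]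
      push_cast
      rw [pv_step]
      ring_nf

-- A's foldl-append accumulation is a map
theorem pv_A_foldl (test_cases : List (List Int)) (acc : List Int) :
    test_cases.foldl (fun results A =>
      let pos : Int := A.foldl (fun s x => if x > 0 then s + 1 else s) 0
      let neg : Int := A.foldl (fun s x => if x < 0 then s + 1 else s) 0
      let count := PySem.Int.floordiv (pos * (pos - 1)) 2 + PySem.Int.floordiv (neg * (neg - 1)) 2
      results ++ [count]) acc
    = acc ++ test_cases.map pvPairCount := by
  induction test_cases generalizing acc with
  | nil => simp
  | cons A tcs ih =>
    simp only [List.foldl_cons, List.map_cons, ih]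
    rw [pv_pairCount_eq]
    have h2 : (0:Int) < 2 := by omega
    simp only [pv_fold_count, zero_add, PySem.Int.floordiv_eq_ediv_of_pos h2]
    simp

-- ===== VERDICT (by name: the statement is the Claim_ definition above) =====
theorem count_positive_products_spec : Claim_equal_count_positive_products := by
  intro tcs _
  unfold Spec_count_positive_products count_positive_products count_positive_products_alt
  simpa using pv_A_foldl tcs []
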